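-- pv_equiv track=rewrite | github.com/ZhangLanTao/APRG | scripts/plane_segmentation.py | convert_xy_level_index_to_hirachical_index
-- ===== SOURCE A (Python) =====
-- patch_sizes = [320, 160, 80, 40, 20, 10]
--
-- def convert_xy_level_index_to_hirachical_index(xy, level):
--     x, y = xy
--     hirachical_index = []
--     hirachical_index.append( 4*(y//patch_sizes[0])+(x//patch_sizes[0]) )
--     x = x%patch_sizes[0]
--     y = y%patch_sizes[0]
--     for i in range(1, level+1):
--         hirachical_index.append(2 * (y // patch_sizes[i]) + (x // patch_sizes[i]))
--         x = x % patch_sizes[i]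
--         y = y % patch_sizes[i]
--     return hirachical_index
-- ===== SOURCE B (Python) =====
-- patch_sizes = [320, 160, 80, 40, 20, 10]
--
-- def convert_xy_level_index_to_hirachical_index(xy, level):
--     x, y = xy
--     return [4 * (y // patch_sizes[0]) + (x // patch_sizes[0])] + [
--         2 * ((y // patch_sizes[i]) % 2) + ((x // patch_sizes[i]) % 2)
--         for i in range(1, level + 1)
--     ]
-- ===== Notes on version B (the rewrite author's own statement) =====
-- stated objective: simpler
-- what changed: Each hierarchical digit is computed independently from the original x,y via (coord // patch_sizes[i]) % 2 in a stateless list comprehension, instead of threading running remainders x,y through a loop.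
import Mathlib
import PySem

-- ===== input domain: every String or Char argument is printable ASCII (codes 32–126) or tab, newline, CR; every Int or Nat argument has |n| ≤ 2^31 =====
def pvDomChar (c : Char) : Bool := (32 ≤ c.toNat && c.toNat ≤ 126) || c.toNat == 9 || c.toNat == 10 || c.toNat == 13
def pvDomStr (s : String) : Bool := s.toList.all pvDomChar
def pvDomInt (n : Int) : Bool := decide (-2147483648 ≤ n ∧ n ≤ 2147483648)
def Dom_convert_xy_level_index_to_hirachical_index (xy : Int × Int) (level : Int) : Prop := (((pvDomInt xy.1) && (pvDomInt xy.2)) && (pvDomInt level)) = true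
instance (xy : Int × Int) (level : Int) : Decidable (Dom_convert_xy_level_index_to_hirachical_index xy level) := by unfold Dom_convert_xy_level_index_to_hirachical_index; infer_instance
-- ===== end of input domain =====

-- B computes each hierarchical digit independently from the original x,y via (coord // p_i) % 2
-- (stateless comprehension) instead of threading running remainders; objective: simpler.


def patch_sizes : List Int := [320, 160, 80, 40, 20, 10]

-- ===== PORT A =====
def convert_xy_level_index_to_hirachical_index (xy : Int × Int) (level : Int) : List Int :=
  let x := xy.1
  let y := xy.2
  let p0 := PySem.List.pyGetD patch_sizes 0 0
  let acc : List Int := [4 * PySem.Int.floordiv y p0 + PySem.Int.floordiv x p0]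
  let x := PySem.Int.mod x p0
  let y := PySem.Int.mod y p0
  let st := (PySem.List.pyRange 1 (level + 1) 1).foldl
    (fun (st : Int × Int × List Int) i =>
      let p := PySem.List.pyGetD patch_sizes i 0
      (PySem.Int.mod st.1 p, PySem.Int.mod st.2.1 p,
        st.2.2 ++ [2 * PySem.Int.floordiv st.2.1 p + PySem.Int.floordiv st.1 p]))
    (x, y, acc)
  st.2.2

-- ===== PORT B =====
def convert_xy_level_index_to_hirachical_index_alt (xy : Int × Int) (level : Int) : List Int :=
  let x := xy.1
  let y := xy.2
  let p0 := PySem.List.pyGetD patch_sizes 0 0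
  (4 * PySem.Int.floordiv y p0 + PySem.Int.floordiv x p0) ::
    (PySem.List.pyRange 1 (level + 1) 1).map (fun i =>
      let p := PySem.List.pyGetD patch_sizes i 0
      2 * PySem.Int.mod (PySem.Int.floordiv y p) 2 + PySem.Int.mod (PySem.Int.floordiv x p) 2)

-- ===== PRECONDITION & SPEC =====
-- Python A raises IndexError (patch_sizes[i] for i ≥ 6) when level ≥ 6; those inputs are excluded.
def Pre_convert_xy_level_index_to_hirachical_index (_xy : Int × Int) (level : Int) : Prop := level ≤ 5
instance (xy : Int × Int) (level : Int) : Decidable (Pre_convert_xy_level_index_to_hirachical_index xy level) := by unfold Pre_convert_xy_level_index_to_hirachical_index; infer_instance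
def pvWitness_convert_xy_level_index_to_hirachical_index : (Int × Int) × Int := ((123, 250), 3)

def Spec_convert_xy_level_index_to_hirachical_index (xy : Int × Int) (level : Int) (out : List Int) : Prop := out = convert_xy_level_index_to_hirachical_index_alt xy level
instance (xy : Int × Int) (level : Int) (out : List Int) : Decidable (Spec_convert_xy_level_index_to_hirachical_index xy level out) := by unfold Spec_convert_xy_level_index_to_hirachical_index; infer_instance

-- ===== CLAIM (what is proved, stated in full; the proofs are below) =====
def Claim_equal_convert_xy_level_index_to_hirachical_index : Prop := ∀ (xy : Int × Int) (level : Int), Dom_convert_xy_level_index_to_hirachical_index xy level → Pre_convert_xy_level_index_to_hirachical_index xy level → Spec_convert_xy_level_index_to_hirachical_index xy level (convert_xy_level_index_to_hirachical_index xy level)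

-- ===== LEMMAS AND PROOFS =====
theorem convert_xy_level_index_to_hirachical_index_spec : Claim_equal_convert_xy_level_index_to_hirachical_index := by
  intro ⟨x, y⟩ level _ hpre
  unfold Spec_convert_xy_level_index_to_hirachical_index
  unfold Pre_convert_xy_level_index_to_hirachical_index at hpre
  simp only [convert_xy_level_index_to_hirachical_index,
    convert_xy_level_index_to_hirachical_index_alt]
  have h : level ≤ 0 ∨ level = 1 ∨ level = 2 ∨ level = 3 ∨ level = 4 ∨ level = 5 := by omega
  rcases h with h | h | h | h | h | h
  · simp [PySem.List.pyRange_one_eq_nil (by omega : level + 1 ≤ 1)]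
  · subst h
    rw [show PySem.List.pyRange 1 (1+1) 1 = [1] from by decide]
    norm_num [patch_sizes, PySem.List.pyGetD, PySem.List.pyGet?, PySem.List.pyIdx?,
      PySem.Int.floordiv_eq_ediv_of_pos, PySem.Int.mod_eq_emod_of_pos, List.foldl,
      List.getElem_cons_succ, List.getElem_cons_zero,
      show Int.toNat 1 = 1 from rfl, show Int.toNat 2 = 2 from rfl,
      show Int.toNat 3 = 3 from rfl, show Int.toNat 4 = 4 from rfl,
      show Int.toNat 5 = 5 from rfl]
    omega
  · subst h
    rw [show PySem.List.pyRange 1 (2+1) 1 = [1, 2] from by decide]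
    norm_num [patch_sizes, PySem.List.pyGetD, PySem.List.pyGet?, PySem.List.pyIdx?,
      PySem.Int.floordiv_eq_ediv_of_pos, PySem.Int.mod_eq_emod_of_pos, List.foldl,
      List.getElem_cons_succ, List.getElem_cons_zero,
      show Int.toNat 1 = 1 from rfl, show Int.toNat 2 = 2 from rfl,
      show Int.toNat 3 = 3 from rfl, show Int.toNat 4 = 4 from rfl,
      show Int.toNat 5 = 5 from rfl]
    omega
  · subst h
    rw [show PySem.List.pyRange 1 (3+1) 1 = [1, 2, 3] from by decide]
    norm_num [patch_sizes, PySem.List.pyGetD, PySem.List.pyGet?, PySem.List.pyIdx?,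
      PySem.Int.floordiv_eq_ediv_of_pos, PySem.Int.mod_eq_emod_of_pos, List.foldl,
      List.getElem_cons_succ, List.getElem_cons_zero,
      show Int.toNat 1 = 1 from rfl, show Int.toNat 2 = 2 from rfl,
      show Int.toNat 3 = 3 from rfl, show Int.toNat 4 = 4 from rfl,
      show Int.toNat 5 = 5 from rfl]
    omega
  · subst h
    rw [show PySem.List.pyRange 1 (4+1) 1 = [1, 2, 3, 4] from by decide]
    norm_num [patch_sizes, PySem.List.pyGetD, PySem.List.pyGet?, PySem.List.pyIdx?,
      PySem.Int.floordiv_eq_ediv_of_pos, PySem.Int.mod_eq_emod_of_pos, List.foldl,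
      List.getElem_cons_succ, List.getElem_cons_zero,
      show Int.toNat 1 = 1 from rfl, show Int.toNat 2 = 2 from rfl,
      show Int.toNat 3 = 3 from rfl, show Int.toNat 4 = 4 from rfl,
      show Int.toNat 5 = 5 from rfl]
    omega
  · subst h
    rw [show PySem.List.pyRange 1 (5+1) 1 = [1, 2, 3, 4, 5] from by decide]
    norm_num [patch_sizes, PySem.List.pyGetD, PySem.List.pyGet?, PySem.List.pyIdx?,
      PySem.Int.floordiv_eq_ediv_of_pos, PySem.Int.mod_eq_emod_of_pos, List.foldl,
      List.getElem_cons_succ, List.getElem_cons_zero,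
      show Int.toNat 1 = 1 from rfl, show Int.toNat 2 = 2 from rfl,
      show Int.toNat 3 = 3 from rfl, show Int.toNat 4 = 4 from rfl,
      show Int.toNat 5 = 5 from rfl]
    omega
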